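-- pv_equiv track=rewrite | github.com/JuanCS-Dev/twitch-v-bot | bot/channel_control.py | parse_terminal_command
-- ===== SOURCE A (Python) =====
-- def parse_terminal_command(command_text: str) -> tuple[str, str]:
--     normalized = " ".join((command_text or "").strip().split())
--     lowered = normalized.lower()
--     if not lowered:
--         raise ValueError("Command is required. Use: list | join <channel> | part <channel>.")
--
--     if lowered in {"list", "channels", "canais"}:
--         return ("list", "")
--
--     for prefix in ("join ", "entrar ", "add "):
--         if lowered.startswith(prefix):
--             return ("join", normalized[len(prefix):].strip())
--
--     for prefix in ("part ", "leave ", "sair ", "remove "):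
--         if lowered.startswith(prefix):
--             return ("part", normalized[len(prefix):].strip())
--
--     raise ValueError("Unsupported command. Use: list | join <channel> | part <channel>.")
-- ===== SOURCE B (Python) =====
-- LIST_WORDS = {"list", "channels", "canais"}
-- JOIN_WORDS = {"join", "entrar", "add"}
-- PART_WORDS = {"part", "leave", "sair", "remove"}
--
--
-- def parse_terminal_command(command_text: str) -> tuple[str, str]:
--     normalized = " ".join((command_text or "").strip().split())
--     if not normalized:
--         raise ValueError("Command is required. Use: list | join <channel> | part <channel>.")
--     head, sep, tail = normalized.partition(" ")
--     verb = head.lower()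
--     if not sep:
--         if verb in LIST_WORDS:
--             return ("list", "")
--     elif verb in JOIN_WORDS:
--         return ("join", tail)
--     elif verb in PART_WORDS:
--         return ("part", tail)
--     raise ValueError("Unsupported command. Use: list | join <channel> | part <channel>.")
-- ===== Notes on version B (the rewrite author's own statement) =====
-- stated objective: idiomatic
-- what changed: A scans two tuples of verb-prefixes with startswith and re-strips the remainder; B partitions the normalized command at the first space once and looks the lowered verb up in three word sets, returning the partition tail directly.
import Mathlib
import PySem

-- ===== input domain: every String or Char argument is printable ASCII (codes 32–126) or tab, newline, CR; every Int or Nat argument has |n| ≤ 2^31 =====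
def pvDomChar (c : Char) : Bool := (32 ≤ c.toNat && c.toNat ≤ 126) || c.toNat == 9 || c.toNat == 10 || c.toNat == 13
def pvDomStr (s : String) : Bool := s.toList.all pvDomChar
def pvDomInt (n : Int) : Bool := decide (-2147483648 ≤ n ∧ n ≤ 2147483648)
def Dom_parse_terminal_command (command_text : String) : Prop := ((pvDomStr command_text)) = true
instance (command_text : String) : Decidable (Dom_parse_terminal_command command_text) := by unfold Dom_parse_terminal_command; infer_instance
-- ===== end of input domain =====

-- B replaces A's two prefix-scanning loops by one partition-at-the-first-space followed by a
-- verb lookup (idiomatic decomposition; same cost). Both raise the same ValueErrors; those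
-- inputs are outside Pre_.

-- ===== PORT A =====
-- A's 'for prefix in (...)' loop: the first matching prefix gives the stripped remainder
def pvScanA (lowered normalized : String) : List String → Option String
  | [] => none
  | p :: ps =>
    if PySem.Str.startswith lowered p then
      some (PySem.Str.strip (PySem.Str.slice normalized (some (PySem.Str.len p : Int)) none))
    else pvScanA lowered normalized ps

-- '(command_text or "")' is command_text itself for strings ('' stays '')
def parse_terminal_command (command_text : String) : String × String :=
  let normalized := PySem.Str.join " " (PySem.Str.split₀ (PySem.Str.strip command_text))
  let lowered := PySem.Str.lower normalized
  if lowered = "" then ("", "")  -- raise ValueError("Command is required. …"): outside Pre_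
  else if lowered = "list" ∨ lowered = "channels" ∨ lowered = "canais" then ("list", "")
  else
    match pvScanA lowered normalized ["join ", "entrar ", "add "] with
    | some rest => ("join", rest)
    | none =>
      match pvScanA lowered normalized ["part ", "leave ", "sair ", "remove "] with
      | some rest => ("part", rest)
      | none => ("", "")  -- raise ValueError("Unsupported command. …"): outside Pre_

-- ===== PORT B =====
-- str.partition(" ") is ported by hand via find + slices (exact: partition splits at the first
-- occurrence of the separator, or yields (s, "", "") when the separator is absent)
def parse_terminal_command_alt (command_text : String) : String × String :=
  let normalized := PySem.Str.join " " (PySem.Str.split₀ (PySem.Str.strip command_text))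
  if normalized = "" then ("", "")  -- raise ValueError("Command is required. …"): outside Pre_
  else
    let i := PySem.Str.find normalized " "
    let head := if i = -1 then normalized else PySem.Str.slice normalized none (some i)
    let tail := if i = -1 then "" else PySem.Str.slice normalized (some (i + 1)) none
    let verb := PySem.Str.lower head
    if i = -1 then
      if verb = "list" ∨ verb = "channels" ∨ verb = "canais" then ("list", "")
      else ("", "")  -- raise ValueError("Unsupported command. …"): outside Pre_
    else if verb = "join" ∨ verb = "entrar" ∨ verb = "add" then ("join", tail)
    else if verb = "part" ∨ verb = "leave" ∨ verb = "sair" ∨ verb = "remove" then ("part", tail)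
    else ("", "")  -- raise ValueError("Unsupported command. …"): outside Pre_

-- ===== PRECONDITION & SPEC =====
-- Pre_ excludes exactly the inputs on which A raises ValueError (empty command or unsupported
-- verb); B raises the very same errors there, so no input on which A returns is excluded.
def Pre_parse_terminal_command (command_text : String) : Prop :=
  let lowered := PySem.Str.lower (PySem.Str.join " " (PySem.Str.split₀ (PySem.Str.strip command_text)))
  lowered = "list" ∨ lowered = "channels" ∨ lowered = "canais" ∨
  PySem.Str.startswith lowered "join " = true ∨ PySem.Str.startswith lowered "entrar " = true ∨
  PySem.Str.startswith lowered "add " = true ∨ PySem.Str.startswith lowered "part " = true ∨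
  PySem.Str.startswith lowered "leave " = true ∨ PySem.Str.startswith lowered "sair " = true ∨
  PySem.Str.startswith lowered "remove " = true

instance (command_text : String) : Decidable (Pre_parse_terminal_command command_text) := by
  unfold Pre_parse_terminal_command; infer_instance

def pvWitness_parse_terminal_command : String := "JOIN  my_channel"

def Spec_parse_terminal_command (command_text : String) (out : String × String) : Prop :=
  out = parse_terminal_command_alt command_text

instance (command_text : String) (out : String × String) : Decidable (Spec_parse_terminal_command command_text out) := by
  unfold Spec_parse_terminal_command; infer_instance

-- ===== CLAIM (what is proved, stated in full; the proofs are below) =====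
def Claim_equal_parse_terminal_command : Prop := ∀ (command_text : String), Dom_parse_terminal_command command_text → Pre_parse_terminal_command command_text → Spec_parse_terminal_command command_text (parse_terminal_command command_text)

-- ===== LEMMAS AND PROOFS =====

-- every word produced by str.split() is nonempty and whitespace-free
def pvGood (ws : List (List Char)) : Prop :=
  ∀ w ∈ ws, w ≠ [] ∧ ∀ c ∈ w, PySem.Chars.isspace c = false

theorem pvSplit₀go_good (s : List Char) : ∀ (cur : List Char) (acc : List (List Char)),
    (∀ c ∈ cur, PySem.Chars.isspace c = false) →
    (∀ w ∈ acc, w ≠ [] ∧ ∀ c ∈ w, PySem.Chars.isspace c = false) →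
    ∀ w ∈ PySem.Chars.split₀.go s cur acc, w ≠ [] ∧ ∀ c ∈ w, PySem.Chars.isspace c = false := by
  induction s with
  | nil =>
    intro cur acc hcur hacc w hw
    rw [PySem.Chars.split₀.go] at hw
    split at hw
    · exact hacc w (by simpa using hw)
    · rw [List.mem_reverse] at hw
      rcases List.mem_cons.mp hw with h | h
      · subst h
        refine ⟨by simpa using ‹¬ cur.isEmpty = true›, ?_⟩
        intro c hc; exact hcur c (List.mem_reverse.mp hc)
      · exact hacc w h
  | cons c rest ih =>
    intro cur acc hcur hacc w hw
    rw [PySem.Chars.split₀.go] at hw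
    split at hw
    · split at hw
      · exact ih [] acc (by simp) hacc w hw
      · refine ih [] _ (by simp) ?_ w hw
        intro w' hw'
        rcases List.mem_cons.mp hw' with h | h
        · subst h
          refine ⟨by simpa using ‹¬ cur.isEmpty = true›, ?_⟩
          intro c' hc'; exact hcur c' (List.mem_reverse.mp hc')
        · exact hacc w' h
    · rename_i hcsp
      refine ih (c :: cur) acc ?_ hacc w hw
      intro c' hc'
      rcases List.mem_cons.mp hc' with h | h
      · subst h; simpa using hcsp
      · exact hcur c' h

theorem pvSplit₀_good (s : List Char) : pvGood (PySem.Chars.split₀ s) := by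
  intro w hw
  exact pvSplit₀go_good s [] [] (by simp) (by simp) w hw

theorem pvLowerChar_space {c : Char} (h : PySem.Chars.lowerChar c = ' ') : c = ' ' := by
  unfold PySem.Chars.lowerChar at h
  split at h
  · exfalso
    rename_i hu
    simp [PySem.Chars.isupper] at hu
    obtain ⟨h1, h2⟩ := hu
    rw [Char.le_def, UInt32.le_iff_toNat_le, Char.toNat_val, Char.toNat_val] at h1 h2
    have hA : ('A').toNat = 65 := by decide
    have hZ : ('Z').toNat = 90 := by decide
    rw [hA] at h1; rw [hZ] at h2
    have hv : Nat.isValidChar (c.toNat + 32) := by left; omega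
    rw [Char.ofNat, dif_pos hv] at h
    have h3 := congrArg Char.toNat h
    rw [Char.toNat_ofNatAux] at h3
    have hsp : (' ').toNat = 32 := by decide
    rw [hsp] at h3
    omega
  · exact h

theorem pvLower_nospace {w : List Char} (hw : ' ' ∉ w) : ' ' ∉ w.map PySem.Chars.lowerChar := by
  intro hm
  obtain ⟨c, hc, he⟩ := List.mem_map.mp hm
  exact hw (pvLowerChar_space he ▸ hc)

theorem pvStartswith_word {lw lp : List Char} (hw : ' ' ∉ lw) :
    PySem.Chars.startswith lw (lp ++ [' ']) = false := by
  rw [← Bool.not_eq_true, PySem.Chars.startswith_iff]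
  intro h
  exact hw (h.subset (by simp))

theorem pvStartswith_word_cons {lw : List Char} (t : List Char) {lp : List Char}
    (hw : ' ' ∉ lw) (hp : ' ' ∉ lp) :
    (PySem.Chars.startswith (lw ++ ' ' :: t) (lp ++ [' ']) = true) ↔ lw = lp := by
  rw [PySem.Chars.startswith_iff]
  induction lw generalizing lp with
  | nil =>
    cases lp with
    | nil => simp [List.cons_prefix_cons]
    | cons d lp' =>
      simp only [List.nil_append, List.cons_append, List.cons_prefix_cons]
      constructor
      · rintro ⟨rfl, -⟩; exact absurd (List.mem_cons_self) hp
      · intro h; cases h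
  | cons a lw' ih =>
    cases lp with
    | nil =>
      simp only [List.cons_append, List.nil_append, List.cons_prefix_cons]
      constructor
      · rintro ⟨rfl, -⟩; exact absurd (List.mem_cons_self) hw
      · intro h; cases h
    | cons d lp' =>
      simp only [List.cons_append, List.cons_prefix_cons]
      have hw' : ' ' ∉ lw' := fun h => hw (List.mem_cons_of_mem _ h)
      have hp' : ' ' ∉ lp' := fun h => hp (List.mem_cons_of_mem _ h)
      rw [ih hw' hp']
      constructor
      · rintro ⟨rfl, rfl⟩; rfl
      · intro h; cases h; exact ⟨rfl, rfl⟩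

theorem pvFind_none {w : List Char} (hw : ' ' ∉ w) : PySem.Chars.find w [' '] = -1 := by
  rw [PySem.Chars.find_eq_neg_one_iff]
  intro h
  exact hw (h.subset (by simp))

theorem pvFind_space {w : List Char} (t : List Char) (hw : ' ' ∉ w) :
    PySem.Chars.find (w ++ ' ' :: t) [' '] = (w.length : Int) := by
  have hocc : [' '] <:+: (w ++ ' ' :: t) := ⟨w, t, by simp⟩
  have hpos : 0 ≤ PySem.Chars.find (w ++ ' ' :: t) [' '] := by
    rw [PySem.Chars.find_nonneg_iff]; exact hocc
  obtain ⟨hpre, hmin⟩ := PySem.Chars.find_spec hpos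
  set f := PySem.Chars.find (w ++ ' ' :: t) [' '] with hf
  have hle : f.toNat ≤ w.length := by
    by_contra hgt
    push Not at hgt
    exact hmin w.length hgt ⟨t, by simp⟩
  have : ¬ f.toNat < w.length := by
    intro hlt
    have hdrop : (w ++ ' ' :: t).drop f.toNat = w.drop f.toNat ++ ' ' :: t := by
      rw [List.drop_append_of_le_length (by omega)]
    rw [hdrop] at hpre
    obtain ⟨u, hu⟩ := hpre
    have hne : w.drop f.toNat ≠ [] := by
      intro he
      have := List.drop_eq_nil_iff.mp he
      omega
    have hhead : (w.drop f.toNat ++ ' ' :: t).head? = some ' ' := by rw [← hu]; simp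
    rw [List.head?_append_of_ne_nil _ hne] at hhead
    rw [List.head?_drop] at hhead
    have : ' ' ∈ w := by
      obtain ⟨hh, hg⟩ := List.getElem?_eq_some_iff.mp hhead
      exact hg ▸ List.getElem_mem hh
    exact hw this
  omega

theorem pvJoin_cons (w v : List Char) (rs : List (List Char)) :
    PySem.Chars.join [' '] (w :: v :: rs) = w ++ ' ' :: PySem.Chars.join [' '] (v :: rs) := by
  simp [PySem.Chars.join, List.intercalate, List.intersperse]

theorem pvJoin_singleton (w : List Char) : PySem.Chars.join [' '] [w] = w := by
  simp [PySem.Chars.join, List.intercalate]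

theorem pvLstrip_id {cs : List Char} (h : ∀ c, cs.head? = some c → PySem.Chars.isspace c = false) :
    PySem.Chars.lstrip cs = cs := by
  unfold PySem.Chars.lstrip
  rw [List.dropWhile_eq_self_iff]
  intro hl
  have : cs.head? = some cs[0] := by
    rw [List.head?_eq_getElem?, List.getElem?_eq_getElem hl]
  simp [h _ this]

theorem pvRstrip_id {cs : List Char} (h : ∀ c, cs.getLast? = some c → PySem.Chars.isspace c = false) :
    PySem.Chars.rstrip cs = cs := by
  unfold PySem.Chars.rstrip
  rw [List.dropWhile_eq_self_iff.mpr ?_, List.reverse_reverse]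
  intro hl
  have : cs.getLast? = some cs.reverse[0] := by
    rw [← List.head?_reverse, List.head?_eq_getElem?, List.getElem?_eq_getElem hl]
  rw [h _ this]
  simp

theorem pvGetLast?_cons {c : Char} {m : List Char} (h : m ≠ []) :
    (c :: m).getLast? = m.getLast? := by
  cases m with
  | nil => exact absurd rfl h
  | cons d m' => simp [List.getLast?_cons_cons]

theorem pvJoin_getLast {ws : List (List Char)} (hg : pvGood ws) (hne : ws ≠ []) :
    ∀ c, (PySem.Chars.join [' '] ws).getLast? = some c → PySem.Chars.isspace c = false := by
  induction ws with
  | nil => exact absurd rfl hne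
  | cons w rest ih =>
    cases rest with
    | nil =>
      intro c hc
      rw [pvJoin_singleton] at hc
      exact (hg w (by simp)).2 c (List.mem_of_getLast? hc)
    | cons v rs =>
      intro c hc
      rw [pvJoin_cons] at hc
      have hm : PySem.Chars.join [' '] (v :: rs) ≠ [] := by
        cases rs with
        | nil => rw [pvJoin_singleton]; exact (hg v (by simp)).1
        | cons v' rs' =>
          rw [pvJoin_cons]
          exact List.append_ne_nil_of_right_ne_nil _ (by simp)
      rw [List.getLast?_append_of_ne_nil _ (by simp), pvGetLast?_cons hm] at hc
      exact ih (fun u hu => hg u (List.mem_cons_of_mem _ hu)) (by simp) c hc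

theorem pvStrip_join {ws : List (List Char)} (h : pvGood ws) :
    PySem.Chars.strip (PySem.Chars.join [' '] ws) = PySem.Chars.join [' '] ws := by
  cases ws with
  | nil => decide
  | cons w rest =>
    unfold PySem.Chars.strip
    have hw := h w (by simp)
    have hhead : ∀ c, (PySem.Chars.join [' '] (w :: rest)).head? = some c → PySem.Chars.isspace c = false := by
      intro c hc
      have hj : PySem.Chars.join [' '] (w :: rest) = w ++ (PySem.Chars.join [' '] (w :: rest)).drop w.length := by
        cases rest with
        | nil => simp
        | cons v rs => rw [pvJoin_cons]; simp
      rw [hj, List.head?_append_of_ne_nil _ hw.1] at hc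
      exact hw.2 c (List.mem_of_mem_head? hc)
    rw [pvLstrip_id hhead]
    exact pvRstrip_id (pvJoin_getLast h (by simp))

theorem pvStr_ne {s t : String} (h : ' ' ∈ s.toList) (h2 : ' ' ∉ t.toList) : ¬ s = t :=
  fun e => h2 (e ▸ h)

theorem pvSliceDrop {N : String} {w m : List Char} (hsplit : N.toList = w ++ ' ' :: m)
    {k : Int} (hk : k = (w.length : Int) + 1) :
    (PySem.Str.slice N (some k) none).toList = m := by
  simp only [PySem.Str.slice, String.toList_ofList, PySem.Chars.slice_eq_listSlice]
  rw [PySem.List.slice_from _ (by omega), hsplit,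
    show w ++ ' ' :: m = (w ++ [' ']) ++ m by simp, hk]
  rw [show ((w.length : Int) + 1).toNat = (w ++ [' ']).length by simp]
  exact List.drop_left

theorem pvTake {N : String} {w m : List Char} (hsplit : N.toList = w ++ ' ' :: m) :
    (PySem.Str.slice N none (some (w.length : Int))).toList = w := by
  simp only [PySem.Str.slice, String.toList_ofList, PySem.Chars.slice_eq_listSlice]
  rw [PySem.List.slice_to _ (by omega), hsplit, Int.toNat_natCast]
  exact List.take_left

-- ===== VERDICT (by name: the statement is the Claim_ definition above) =====
theorem parse_terminal_command_spec : Claim_equal_parse_terminal_command := by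
  have main : ∀ (N : String) (ws : List (List Char)),
      N.toList = PySem.Chars.join [' '] ws → pvGood ws →
      (PySem.Str.lower N = "list" ∨ PySem.Str.lower N = "channels" ∨ PySem.Str.lower N = "canais" ∨
       PySem.Str.startswith (PySem.Str.lower N) "join " = true ∨
       PySem.Str.startswith (PySem.Str.lower N) "entrar " = true ∨
       PySem.Str.startswith (PySem.Str.lower N) "add " = true ∨
       PySem.Str.startswith (PySem.Str.lower N) "part " = true ∨
       PySem.Str.startswith (PySem.Str.lower N) "leave " = true ∨
       PySem.Str.startswith (PySem.Str.lower N) "sair " = true ∨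
       PySem.Str.startswith (PySem.Str.lower N) "remove " = true) →
      (if PySem.Str.lower N = "" then (("", "") : String × String)
       else if PySem.Str.lower N = "list" ∨ PySem.Str.lower N = "channels" ∨ PySem.Str.lower N = "canais" then
         ("list", "")
       else
         match pvScanA (PySem.Str.lower N) N ["join ", "entrar ", "add "] with
         | some rest => ("join", rest)
         | none =>
           match pvScanA (PySem.Str.lower N) N ["part ", "leave ", "sair ", "remove "] with
           | some rest => ("part", rest)
           | none => ("", ""))
      =
      (if N = "" then (("", "") : String × String)
       else if PySem.Str.find N " " = -1 then
         if PySem.Str.lower (if PySem.Str.find N " " = -1 then N else PySem.Str.slice N none (some (PySem.Str.find N " "))) = "list" ∨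
            PySem.Str.lower (if PySem.Str.find N " " = -1 then N else PySem.Str.slice N none (some (PySem.Str.find N " "))) = "channels" ∨
            PySem.Str.lower (if PySem.Str.find N " " = -1 then N else PySem.Str.slice N none (some (PySem.Str.find N " "))) = "canais" then
           ("list", "")
         else ("", "")
       else if PySem.Str.lower (if PySem.Str.find N " " = -1 then N else PySem.Str.slice N none (some (PySem.Str.find N " "))) = "join" ∨
               PySem.Str.lower (if PySem.Str.find N " " = -1 then N else PySem.Str.slice N none (some (PySem.Str.find N " "))) = "entrar" ∨
               PySem.Str.lower (if PySem.Str.find N " " = -1 then N else PySem.Str.slice N none (some (PySem.Str.find N " "))) = "add" then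
         ("join", if PySem.Str.find N " " = -1 then "" else PySem.Str.slice N (some (PySem.Str.find N " " + 1)) none)
       else if PySem.Str.lower (if PySem.Str.find N " " = -1 then N else PySem.Str.slice N none (some (PySem.Str.find N " "))) = "part" ∨
               PySem.Str.lower (if PySem.Str.find N " " = -1 then N else PySem.Str.slice N none (some (PySem.Str.find N " "))) = "leave" ∨
               PySem.Str.lower (if PySem.Str.find N " " = -1 then N else PySem.Str.slice N none (some (PySem.Str.find N " "))) = "sair" ∨
               PySem.Str.lower (if PySem.Str.find N " " = -1 then N else PySem.Str.slice N none (some (PySem.Str.find N " "))) = "remove" then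
         ("part", if PySem.Str.find N " " = -1 then "" else PySem.Str.slice N (some (PySem.Str.find N " " + 1)) none)
       else ("", "")) := by
    intro N ws hN hg hpre
    cases ws with
    | nil =>
      exfalso
      have hL : (PySem.Str.lower N).toList = [] := by
        rw [PySem.Str.toList_lower, hN]
        simp [PySem.Chars.join, List.intercalate, PySem.Chars.lower]
      rcases hpre with h | h | h | h | h | h | h | h | h | h
      · have := congrArg String.toList h; rw [hL] at this; exact absurd this (by decide)
      · have := congrArg String.toList h; rw [hL] at this; exact absurd this (by decide)
      · have := congrArg String.toList h; rw [hL] at this; exact absurd this (by decide)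
      · rw [PySem.Str.startswith_eq, hL] at h; exact absurd h (by decide)
      · rw [PySem.Str.startswith_eq, hL] at h; exact absurd h (by decide)
      · rw [PySem.Str.startswith_eq, hL] at h; exact absurd h (by decide)
      · rw [PySem.Str.startswith_eq, hL] at h; exact absurd h (by decide)
      · rw [PySem.Str.startswith_eq, hL] at h; exact absurd h (by decide)
      · rw [PySem.Str.startswith_eq, hL] at h; exact absurd h (by decide)
      · rw [PySem.Str.startswith_eq, hL] at h; exact absurd h (by decide)
    | cons w rest =>
      have hwprop := hg w (by simp)
      have hwsp : ' ' ∉ w := fun hm => absurd (hwprop.2 ' ' hm) (by decide)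
      have hlwsp := pvLower_nospace hwsp
      cases rest with
      | nil =>
        have hNw : N.toList = w := by rw [hN, pvJoin_singleton]
        have hL : (PySem.Str.lower N).toList = w.map PySem.Chars.lowerChar := by
          rw [PySem.Str.toList_lower]
          simp only [PySem.Chars.lower]
          rw [hNw]
        have hrefute : ∀ (W R : String), W.toList = R.toList ++ [' '] →
            PySem.Str.startswith (PySem.Str.lower N) W = false := by
          intro W R hWR
          rw [PySem.Str.startswith_eq, hWR, hL]
          exact pvStartswith_word hlwsp
        have hlow : PySem.Str.lower N = "list" ∨ PySem.Str.lower N = "channels" ∨ PySem.Str.lower N = "canais" := by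
          rcases hpre with h | h | h | h | h | h | h | h | h | h
          · exact Or.inl h
          · exact Or.inr (Or.inl h)
          · exact Or.inr (Or.inr h)
          · rw [hrefute "join " "join" (by decide)] at h; exact Bool.noConfusion h
          · rw [hrefute "entrar " "entrar" (by decide)] at h; exact Bool.noConfusion h
          · rw [hrefute "add " "add" (by decide)] at h; exact Bool.noConfusion h
          · rw [hrefute "part " "part" (by decide)] at h; exact Bool.noConfusion h
          · rw [hrefute "leave " "leave" (by decide)] at h; exact Bool.noConfusion h
          · rw [hrefute "sair " "sair" (by decide)] at h; exact Bool.noConfusion h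
          · rw [hrefute "remove " "remove" (by decide)] at h; exact Bool.noConfusion h
        have hlnN : ¬ PySem.Str.lower N = "" := by
          rcases hlow with h | h | h <;> (rw [h]; decide)
        have hNne : ¬ N = "" := by
          intro h0
          rw [h0] at hNw
          exact hwprop.1 (by simpa using hNw.symm)
        have hi : PySem.Str.find N " " = -1 := by
          simp only [PySem.Str.find]
          rw [hNw, show (" " : String).toList = [' '] from by decide]
          exact pvFind_none hwsp
        rw [if_neg hlnN, if_pos hlow, if_neg hNne, hi]
        simp only [reduceIte]
        rw [if_pos hlow]
      | cons v rs =>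
        have hsplit : N.toList = w ++ ' ' :: PySem.Chars.join [' '] (v :: rs) := by
          rw [hN, pvJoin_cons]
        set m := PySem.Chars.join [' '] (v :: rs) with hm
        have hstrip : PySem.Chars.strip m = m :=
          pvStrip_join (fun u hu => hg u (List.mem_cons_of_mem _ hu))
        have hL : (PySem.Str.lower N).toList = w.map PySem.Chars.lowerChar ++ ' ' :: m.map PySem.Chars.lowerChar := by
          rw [PySem.Str.toList_lower]
          simp only [PySem.Chars.lower]
          rw [hsplit]
          simp [(by decide : PySem.Chars.lowerChar ' ' = ' ')]
        have hiff : ∀ (W R : String), W.toList = R.toList ++ [' '] → ' ' ∉ R.toList →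
            (PySem.Str.startswith (PySem.Str.lower N) W = true ↔ w.map PySem.Chars.lowerChar = R.toList) := by
          intro W R hWR hR
          rw [PySem.Str.startswith_eq, hWR, hL]
          exact pvStartswith_word_cons _ hlwsp hR
        have hspmem : ' ' ∈ (PySem.Str.lower N).toList := by rw [hL]; simp
        have hlnN : ¬ PySem.Str.lower N = "" := by
          intro h0; rw [h0] at hL; simp at hL
        have hnLIST : ¬ (PySem.Str.lower N = "list" ∨ PySem.Str.lower N = "channels" ∨ PySem.Str.lower N = "canais") := by
          rintro (h | h | h) <;> exact pvStr_ne hspmem (by decide) h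
        have hNne : ¬ N = "" := by
          intro h0; rw [h0] at hsplit; simp at hsplit
        have hi : PySem.Str.find N " " = (w.length : Int) := by
          simp only [PySem.Str.find]
          rw [hsplit, show (" " : String).toList = [' '] from by decide]
          exact pvFind_space m hwsp
        have hF : (((w.length : Nat) : Int) = -1) = False := eq_false (by omega)
        have hhead : (PySem.Str.slice N none (some ((w.length : Nat) : Int))).toList = w := pvTake hsplit
        have htailB : (PySem.Str.slice N (some ((w.length : Int) + 1)) none).toList = m := pvSliceDrop hsplit rfl
        rcases hpre with h | h | h | h | h | h | h | h | h | h
        · exact absurd h (pvStr_ne hspmem (by decide))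
        · exact absurd h (pvStr_ne hspmem (by decide))
        · exact absurd h (pvStr_ne hspmem (by decide))
        ·
          -- word "join"
          have hlw : w.map PySem.Chars.lowerChar = ("join").toList := (hiff "join " "join" (by decide) (by decide)).mp h
          have hwlen : w.length = 4 := by simpa using congrArg List.length hlw
          have hk : (PySem.Str.len "join ") = (w.length : Int) + 1 := by rw [hwlen]; decide
          have hverb : PySem.Str.lower (PySem.Str.slice N none (some ((w.length : Nat) : Int))) = "join" := by
            apply String.toList_inj.mp
            rw [PySem.Str.toList_lower]
            simp only [PySem.Chars.lower]
            rw [hhead, hlw]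
          have h2 : PySem.Str.strip (PySem.Str.slice N (some (PySem.Str.len "join ")) none) = PySem.Str.slice N (some ((w.length : Int) + 1)) none := by
            apply String.toList_inj.mp
            rw [PySem.Str.toList_strip, pvSliceDrop hsplit hk, hstrip, htailB]
          rw [if_neg hlnN, if_neg hnLIST]
          simp only [pvScanA]
          rw [if_pos ((hiff "join " "join" (by decide) (by decide)).mpr hlw)]
          rw [if_neg hNne, hi]
          simp only [hF, if_false]
          rw [hverb]
          rw [if_pos (by decide)]
          exact congrArg (Prod.mk "join") h2
        ·
          -- word "entrar"
          have hlw : w.map PySem.Chars.lowerChar = ("entrar").toList := (hiff "entrar " "entrar" (by decide) (by decide)).mp h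
          have hwlen : w.length = 6 := by simpa using congrArg List.length hlw
          have hk : (PySem.Str.len "entrar ") = (w.length : Int) + 1 := by rw [hwlen]; decide
          have hverb : PySem.Str.lower (PySem.Str.slice N none (some ((w.length : Nat) : Int))) = "entrar" := by
            apply String.toList_inj.mp
            rw [PySem.Str.toList_lower]
            simp only [PySem.Chars.lower]
            rw [hhead, hlw]
          have h2 : PySem.Str.strip (PySem.Str.slice N (some (PySem.Str.len "entrar ")) none) = PySem.Str.slice N (some ((w.length : Int) + 1)) none := by
            apply String.toList_inj.mp
            rw [PySem.Str.toList_strip, pvSliceDrop hsplit hk, hstrip, htailB]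
          rw [if_neg hlnN, if_neg hnLIST]
          simp only [pvScanA]
          rw [if_neg (by rw [hiff "join " "join" (by decide) (by decide), hlw]; decide)]
          rw [if_pos ((hiff "entrar " "entrar" (by decide) (by decide)).mpr hlw)]
          rw [if_neg hNne, hi]
          simp only [hF, if_false]
          rw [hverb]
          rw [if_pos (by decide)]
          exact congrArg (Prod.mk "join") h2
        ·
          -- word "add"
          have hlw : w.map PySem.Chars.lowerChar = ("add").toList := (hiff "add " "add" (by decide) (by decide)).mp h
          have hwlen : w.length = 3 := by simpa using congrArg List.length hlw
          have hk : (PySem.Str.len "add ") = (w.length : Int) + 1 := by rw [hwlen]; decide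
          have hverb : PySem.Str.lower (PySem.Str.slice N none (some ((w.length : Nat) : Int))) = "add" := by
            apply String.toList_inj.mp
            rw [PySem.Str.toList_lower]
            simp only [PySem.Chars.lower]
            rw [hhead, hlw]
          have h2 : PySem.Str.strip (PySem.Str.slice N (some (PySem.Str.len "add ")) none) = PySem.Str.slice N (some ((w.length : Int) + 1)) none := by
            apply String.toList_inj.mp
            rw [PySem.Str.toList_strip, pvSliceDrop hsplit hk, hstrip, htailB]
          rw [if_neg hlnN, if_neg hnLIST]
          simp only [pvScanA]
          rw [if_neg (by rw [hiff "join " "join" (by decide) (by decide), hlw]; decide)]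
          rw [if_neg (by rw [hiff "entrar " "entrar" (by decide) (by decide), hlw]; decide)]
          rw [if_pos ((hiff "add " "add" (by decide) (by decide)).mpr hlw)]
          rw [if_neg hNne, hi]
          simp only [hF, if_false]
          rw [hverb]
          rw [if_pos (by decide)]
          exact congrArg (Prod.mk "join") h2
        ·
          -- word "part"
          have hlw : w.map PySem.Chars.lowerChar = ("part").toList := (hiff "part " "part" (by decide) (by decide)).mp h
          have hwlen : w.length = 4 := by simpa using congrArg List.length hlw
          have hk : (PySem.Str.len "part ") = (w.length : Int) + 1 := by rw [hwlen]; decide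
          have hverb : PySem.Str.lower (PySem.Str.slice N none (some ((w.length : Nat) : Int))) = "part" := by
            apply String.toList_inj.mp
            rw [PySem.Str.toList_lower]
            simp only [PySem.Chars.lower]
            rw [hhead, hlw]
          have h2 : PySem.Str.strip (PySem.Str.slice N (some (PySem.Str.len "part ")) none) = PySem.Str.slice N (some ((w.length : Int) + 1)) none := by
            apply String.toList_inj.mp
            rw [PySem.Str.toList_strip, pvSliceDrop hsplit hk, hstrip, htailB]
          rw [if_neg hlnN, if_neg hnLIST]
          simp only [pvScanA]
          rw [if_neg (by rw [hiff "join " "join" (by decide) (by decide), hlw]; decide)]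
          rw [if_neg (by rw [hiff "entrar " "entrar" (by decide) (by decide), hlw]; decide)]
          rw [if_neg (by rw [hiff "add " "add" (by decide) (by decide), hlw]; decide)]
          rw [if_pos ((hiff "part " "part" (by decide) (by decide)).mpr hlw)]
          rw [if_neg hNne, hi]
          simp only [hF, if_false]
          rw [hverb]
          rw [if_neg (by decide), if_pos (by decide)]
          exact congrArg (Prod.mk "part") h2
        ·
          -- word "leave"
          have hlw : w.map PySem.Chars.lowerChar = ("leave").toList := (hiff "leave " "leave" (by decide) (by decide)).mp h
          have hwlen : w.length = 5 := by simpa using congrArg List.length hlw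
          have hk : (PySem.Str.len "leave ") = (w.length : Int) + 1 := by rw [hwlen]; decide
          have hverb : PySem.Str.lower (PySem.Str.slice N none (some ((w.length : Nat) : Int))) = "leave" := by
            apply String.toList_inj.mp
            rw [PySem.Str.toList_lower]
            simp only [PySem.Chars.lower]
            rw [hhead, hlw]
          have h2 : PySem.Str.strip (PySem.Str.slice N (some (PySem.Str.len "leave ")) none) = PySem.Str.slice N (some ((w.length : Int) + 1)) none := by
            apply String.toList_inj.mp
            rw [PySem.Str.toList_strip, pvSliceDrop hsplit hk, hstrip, htailB]
          rw [if_neg hlnN, if_neg hnLIST]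
          simp only [pvScanA]
          rw [if_neg (by rw [hiff "join " "join" (by decide) (by decide), hlw]; decide)]
          rw [if_neg (by rw [hiff "entrar " "entrar" (by decide) (by decide), hlw]; decide)]
          rw [if_neg (by rw [hiff "add " "add" (by decide) (by decide), hlw]; decide)]
          rw [if_neg (by rw [hiff "part " "part" (by decide) (by decide), hlw]; decide)]
          rw [if_pos ((hiff "leave " "leave" (by decide) (by decide)).mpr hlw)]
          rw [if_neg hNne, hi]
          simp only [hF, if_false]
          rw [hverb]
          rw [if_neg (by decide), if_pos (by decide)]
          exact congrArg (Prod.mk "part") h2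
        ·
          -- word "sair"
          have hlw : w.map PySem.Chars.lowerChar = ("sair").toList := (hiff "sair " "sair" (by decide) (by decide)).mp h
          have hwlen : w.length = 4 := by simpa using congrArg List.length hlw
          have hk : (PySem.Str.len "sair ") = (w.length : Int) + 1 := by rw [hwlen]; decide
          have hverb : PySem.Str.lower (PySem.Str.slice N none (some ((w.length : Nat) : Int))) = "sair" := by
            apply String.toList_inj.mp
            rw [PySem.Str.toList_lower]
            simp only [PySem.Chars.lower]
            rw [hhead, hlw]
          have h2 : PySem.Str.strip (PySem.Str.slice N (some (PySem.Str.len "sair ")) none) = PySem.Str.slice N (some ((w.length : Int) + 1)) none := by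
            apply String.toList_inj.mp
            rw [PySem.Str.toList_strip, pvSliceDrop hsplit hk, hstrip, htailB]
          rw [if_neg hlnN, if_neg hnLIST]
          simp only [pvScanA]
          rw [if_neg (by rw [hiff "join " "join" (by decide) (by decide), hlw]; decide)]
          rw [if_neg (by rw [hiff "entrar " "entrar" (by decide) (by decide), hlw]; decide)]
          rw [if_neg (by rw [hiff "add " "add" (by decide) (by decide), hlw]; decide)]
          rw [if_neg (by rw [hiff "part " "part" (by decide) (by decide), hlw]; decide)]
          rw [if_neg (by rw [hiff "leave " "leave" (by decide) (by decide), hlw]; decide)]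
          rw [if_pos ((hiff "sair " "sair" (by decide) (by decide)).mpr hlw)]
          rw [if_neg hNne, hi]
          simp only [hF, if_false]
          rw [hverb]
          rw [if_neg (by decide), if_pos (by decide)]
          exact congrArg (Prod.mk "part") h2
        ·
          -- word "remove"
          have hlw : w.map PySem.Chars.lowerChar = ("remove").toList := (hiff "remove " "remove" (by decide) (by decide)).mp h
          have hwlen : w.length = 6 := by simpa using congrArg List.length hlw
          have hk : (PySem.Str.len "remove ") = (w.length : Int) + 1 := by rw [hwlen]; decide
          have hverb : PySem.Str.lower (PySem.Str.slice N none (some ((w.length : Nat) : Int))) = "remove" := by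
            apply String.toList_inj.mp
            rw [PySem.Str.toList_lower]
            simp only [PySem.Chars.lower]
            rw [hhead, hlw]
          have h2 : PySem.Str.strip (PySem.Str.slice N (some (PySem.Str.len "remove ")) none) = PySem.Str.slice N (some ((w.length : Int) + 1)) none := by
            apply String.toList_inj.mp
            rw [PySem.Str.toList_strip, pvSliceDrop hsplit hk, hstrip, htailB]
          rw [if_neg hlnN, if_neg hnLIST]
          simp only [pvScanA]
          rw [if_neg (by rw [hiff "join " "join" (by decide) (by decide), hlw]; decide)]
          rw [if_neg (by rw [hiff "entrar " "entrar" (by decide) (by decide), hlw]; decide)]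
          rw [if_neg (by rw [hiff "add " "add" (by decide) (by decide), hlw]; decide)]
          rw [if_neg (by rw [hiff "part " "part" (by decide) (by decide), hlw]; decide)]
          rw [if_neg (by rw [hiff "leave " "leave" (by decide) (by decide), hlw]; decide)]
          rw [if_neg (by rw [hiff "sair " "sair" (by decide) (by decide), hlw]; decide)]
          rw [if_pos ((hiff "remove " "remove" (by decide) (by decide)).mpr hlw)]
          rw [if_neg hNne, hi]
          simp only [hF, if_false]
          rw [hverb]
          rw [if_neg (by decide), if_pos (by decide)]
          exact congrArg (Prod.mk "part") h2
  intro ct hdom hpre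
  refine main (PySem.Str.join " " (PySem.Str.split₀ (PySem.Str.strip ct))) (PySem.Chars.split₀ (PySem.Chars.strip ct.toList)) ?_ (pvSplit₀_good _) hpre
  rw [PySem.Str.toList_join, PySem.Str.split₀_map_toList, PySem.Str.toList_strip,
    show (" " : String).toList = [' '] from by decide]
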